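-- pv_equiv track=rewrite | github.com/egg-laying-cow/tic-tac-toe | tic_tac_toe_minimax.py | check_row_end
-- ===== SOURCE A (Python) =====
-- MAX_LEN = 5 # nguoi choi dat duoc 5X hoac 5O thi se thang
--
-- def check_row_end(state: list[list], last_move: tuple[int, int]) -> bool:
--     count = 0
--     x1 = max(last_move[0] - (MAX_LEN - 1), 0)
--     x2 = min(last_move[0] + (MAX_LEN - 1), len(state) - 1)
--
--     for x in range(x1, x2 + 1):
--         if state[last_move[1]][x] == state[last_move[1]][last_move[0]]:
--             count += 1
--         else:
--             count = 0
--
--         if (count >= MAX_LEN):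
--             return True
--
--     return False
-- ===== SOURCE B (Python) =====
-- MAX_LEN = 5 # nguoi choi dat duoc 5X hoac 5O thi se thang
--
-- def check_row_end(state: list[list], last_move: tuple[int, int]) -> bool:
--     x0 = last_move[0]
--     if not (0 <= x0 < len(state)):
--         return False  # window too short (or off-board): no 5-run possible
--     row = state[last_move[1]]
--     pivot = row[x0]
--     hi = len(state) - 1
--     need = MAX_LEN - 1
--     left = 0
--     while left < need and 0 <= x0 - left - 1 and row[x0 - left - 1] == pivot:
--         left += 1
--     right = 0
--     while right < need - left and x0 + right + 1 <= hi and row[x0 + right + 1] == pivot: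
--         right += 1
--     return left + right + 1 >= MAX_LEN
-- ===== Notes on version B (the rewrite author's own statement) =====
-- stated objective: alternative
-- what changed: Instead of one left-to-right sliding scan over the clamped 9-cell window with a reset counter, B expands outward from the last move: it counts contiguous matching cells leftward (at most MAX_LEN-1) and then rightward only as many as are still needed, and tests left+right+1 >= MAX_LEN; B's reads are a subset of A's, so it returns A's value (including the early True) wherever A returns.
import Mathlib
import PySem

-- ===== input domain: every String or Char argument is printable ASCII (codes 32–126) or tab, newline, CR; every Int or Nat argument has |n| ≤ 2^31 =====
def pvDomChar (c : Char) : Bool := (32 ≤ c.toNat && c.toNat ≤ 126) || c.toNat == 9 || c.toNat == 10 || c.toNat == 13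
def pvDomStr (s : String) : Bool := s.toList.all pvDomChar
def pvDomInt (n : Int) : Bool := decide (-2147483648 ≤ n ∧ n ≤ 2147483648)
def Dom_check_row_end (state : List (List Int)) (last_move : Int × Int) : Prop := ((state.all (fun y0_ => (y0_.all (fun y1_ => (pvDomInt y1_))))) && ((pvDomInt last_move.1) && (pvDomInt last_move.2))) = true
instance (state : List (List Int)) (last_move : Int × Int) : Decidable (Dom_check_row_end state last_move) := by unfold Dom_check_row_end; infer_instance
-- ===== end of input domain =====

-- B replaces A's single sliding scan (reset counter) over the clamped window by two bounded
-- outward walks from the last move (right walk stops once enough cells are found); return values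
-- are proved equal on Pre_, which excludes exactly the inputs where the Python A raises IndexError.

-- ===== PORT A =====
-- MAX_LEN = 5
def pvMAX_LEN : Int := 5

-- literal port of A: window [x1, x2] clamped to the board, one left-to-right scan with a reset
-- counter and an early-return flag (the second component of the fold state).
def check_row_end (state : List (List Int)) (last_move : Int × Int) : Bool :=
  let x1 : Int := max (last_move.1 - (pvMAX_LEN - 1)) 0
  let x2 : Int := min (last_move.1 + (pvMAX_LEN - 1)) ((state.length : Int) - 1)
  ((PySem.List.pyRange x1 (x2 + 1) 1).foldl
    (fun (acc : Int × Bool) x =>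
      if acc.2 then acc
      else
        let row := PySem.List.pyGetD state last_move.2 []
        let c : Int := if PySem.List.pyGetD row x 0 = PySem.List.pyGetD row last_move.1 0 then acc.1 + 1 else 0
        (c, decide (c ≥ pvMAX_LEN)))
    (0, false)).2

-- ===== PORT B =====
-- literal port of Source B's left while-loop: count contiguous matches leftward, at most `need` steps
-- (the Nat argument is fuel making the while-loop structural; `need` iterations always suffice).
def pvWalkL (row : List Int) (pivot x0 need left : Int) : Nat → Int
  | 0 => left
  | fuel + 1 =>
    if left < need ∧ 0 ≤ x0 - left - 1 ∧ PySem.List.pyGetD row (x0 - left - 1) 0 = pivot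
    then pvWalkL row pivot x0 need (left + 1) fuel
    else left

-- literal port of Source B's right while-loop: count matches rightward, only as many as still needed.
def pvWalkR (row : List Int) (pivot hi x0 bound right : Int) : Nat → Int
  | 0 => right
  | fuel + 1 =>
    if right < bound ∧ x0 + right + 1 ≤ hi ∧ PySem.List.pyGetD row (x0 + right + 1) 0 = pivot
    then pvWalkR row pivot hi x0 bound (right + 1) fuel
    else right

def check_row_end_alt (state : List (List Int)) (last_move : Int × Int) : Bool :=
  if 0 ≤ last_move.1 ∧ last_move.1 < (state.length : Int) then
    let row := PySem.List.pyGetD state last_move.2 []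
    let pivot := PySem.List.pyGetD row last_move.1 0
    let hi : Int := (state.length : Int) - 1
    let need : Int := pvMAX_LEN - 1
    let left := pvWalkL row pivot last_move.1 need 0 need.toNat
    let right := pvWalkR row pivot hi last_move.1 (need - left) 0 (need - left).toNat
    decide (left + right + 1 ≥ pvMAX_LEN)
  else false  -- window too short (or off-board): no 5-run possible

-- ===== PRECONDITION & SPEC =====
-- Pre_ excludes exactly the inputs on which the Python A raises IndexError: a nonempty scan window
-- with the row index off the board, the pivot column outside the row, or the row too short for the
-- window with no winning 5-run completing before the first out-of-range read.
def Pre_check_row_end (state : List (List Int)) (last_move : Int × Int) : Prop :=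
  let x0 := last_move.1
  let n : Int := (state.length : Int)
  let x1 := max (x0 - 4) 0
  let x2 := min (x0 + 4) (n - 1)
  x2 < x1 ∨
  (PySem.Raise.InRange state.length last_move.2 ∧
   PySem.Raise.InRange (PySem.List.pyGetD state last_move.2 []).length x0 ∧
   (x2 < ((PySem.List.pyGetD state last_move.2 []).length : Int) ∨
    ∃ k ∈ PySem.List.pyRange x1 (x2 + 1) 1,
      k + 4 ≤ min x2 (((PySem.List.pyGetD state last_move.2 []).length : Int) - 1) ∧
      ∀ j ∈ PySem.List.pyRange k (k + 5) 1,
        PySem.List.pyGetD (PySem.List.pyGetD state last_move.2 []) j 0 =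
          PySem.List.pyGetD (PySem.List.pyGetD state last_move.2 []) x0 0))
instance (state : List (List Int)) (last_move : Int × Int) : Decidable (Pre_check_row_end state last_move) := by unfold Pre_check_row_end; infer_instance

def pvWitness_check_row_end : List (List Int) × (Int × Int) :=
  ([[1, 1, 1, 0, 0], [0, 0, 0, 0, 0], [0, 0, 0, 0, 0], [0, 0, 0, 0, 0], [0, 0, 0, 0, 0]], (2, 0))

def Spec_check_row_end (state : List (List Int)) (last_move : Int × Int) (out : Bool) : Prop := out = check_row_end_alt state last_move
instance (state : List (List Int)) (last_move : Int × Int) (out : Bool) : Decidable (Spec_check_row_end state last_move out) := by unfold Spec_check_row_end; infer_instance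

-- ===== CLAIM (what is proved, stated in full; the proofs are below) =====
def Claim_equal_check_row_end : Prop := ∀ (state : List (List Int)) (last_move : Int × Int), Dom_check_row_end state last_move → Pre_check_row_end state last_move → Spec_check_row_end state last_move (check_row_end state last_move)

-- ===== LEMMAS AND PROOFS =====

-- Proof-side bounded outward walk with both clamps (the shape the window lemmas talk about).
def pvCountDir (row : List Int) (pivot : Int) (x dx lo hi : Int) : Nat → Int
  | 0 => 0
  | budget + 1 =>
    let nx := x + dx
    if nx < lo ∨ nx > hi ∨ PySem.List.pyGetD row nx 0 ≠ pivot then 0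
    else 1 + pvCountDir row pivot nx dx lo hi budget

lemma pvCountDir_nonneg (row : List Int) (pivot dx lo hi : Int) :
    ∀ (b : Nat) (x : Int), 0 ≤ pvCountDir row pivot x dx lo hi b := by
  intro b
  induction b with
  | zero => intro x; simp [pvCountDir]
  | succ b ih =>
      intro x
      simp only [pvCountDir]
      split_ifs
      · omega
      · have := ih (x + dx); omega

lemma pvCountDir_le (row : List Int) (pivot dx lo hi : Int) :
    ∀ (b : Nat) (x : Int), pvCountDir row pivot x dx lo hi b ≤ (b : Int) := by
  intro b
  induction b with
  | zero => intro x; simp [pvCountDir]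
  | succ b ih =>
      intro x
      simp only [pvCountDir]
      split_ifs
      · push_cast; omega
      · have := ih (x + dx); push_cast; push_cast at this; omega

lemma pvCountDir_trunc (row : List Int) (pivot dx lo hi : Int) :
    ∀ (b b' : Nat) (x : Int), b ≤ b' →
      pvCountDir row pivot x dx lo hi b = min (pvCountDir row pivot x dx lo hi b') (b : Int) := by
  intro b
  induction b with
  | zero =>
      intro b' x _
      have := pvCountDir_nonneg row pivot dx lo hi b' x
      simp [pvCountDir]; omega
  | succ b ih =>
      intro b' x hb
      rcases b' with _ | b'
      · omega
      simp only [pvCountDir]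
      split_ifs
      · exact (min_eq_left (by push_cast; omega)).symm
      · have h := ih b' (x + dx) (by omega)
        have h0 := pvCountDir_nonneg row pivot dx lo hi b' (x + dx)
        rw [h]; push_cast; omega

-- B's left while-loop equals the clamped outward walk (the hi clamp never fires going left).
lemma pvWalkL_eq (row : List Int) (pivot hi : Int) :
    ∀ (b : Nat) (left x0 : Int), 0 ≤ left → left + (b : Int) = 4 → x0 ≤ hi →
      pvWalkL row pivot x0 4 left b = left + pvCountDir row pivot (x0 - left) (-1) 0 hi b := by
  intro b
  induction b with
  | zero => intro left x0 _ _ _; simp [pvWalkL, pvCountDir]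
  | succ b ih =>
      intro left x0 hl hb hhi
      simp only [pvWalkL, pvCountDir]
      have hx : x0 - left + -1 = x0 - (left + 1) := by ring
      by_cases hm : 0 ≤ x0 - left - 1 ∧ PySem.List.pyGetD row (x0 - left - 1) 0 = pivot
      · rw [if_pos ⟨by push_cast at hb; omega, hm.1, hm.2⟩,
          if_neg (by rw [hx]; push Not; refine ⟨by omega, by omega, by rw [show x0 - (left + 1) = x0 - left - 1 by ring]; exact hm.2⟩)]
        rw [ih (left + 1) x0 (by omega) (by push_cast at hb ⊢; omega) hhi, hx]
        ring
      · have hcond : x0 - left + -1 < 0 ∨ x0 - left + -1 > hi ∨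
            PySem.List.pyGetD row (x0 - left + -1) 0 ≠ pivot := by
          rw [show x0 - left + -1 = x0 - left - 1 by ring]
          push Not at hm
          by_cases h0 : 0 ≤ x0 - left - 1
          · exact Or.inr (Or.inr (hm h0))
          · exact Or.inl (by omega)
        rw [if_neg (by push Not at hm ⊢; intro _ h0; exact hm h0), if_pos hcond]
        omega

-- B's right while-loop equals the clamped outward walk with its (possibly reduced) budget.
lemma pvWalkR_eq (row : List Int) (pivot hi : Int) :
    ∀ (b : Nat) (right x0 bound : Int), 0 ≤ right → 0 ≤ x0 → right + (b : Int) = bound →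
      pvWalkR row pivot hi x0 bound right b = right + pvCountDir row pivot (x0 + right) 1 0 hi b := by
  intro b
  induction b with
  | zero => intro right x0 bound _ _ _; simp [pvWalkR, pvCountDir]
  | succ b ih =>
      intro right x0 bound hr hx hb
      simp only [pvWalkR, pvCountDir]
      have hx1 : x0 + right + 1 = x0 + (right + 1) := by ring
      by_cases hm : x0 + right + 1 ≤ hi ∧ PySem.List.pyGetD row (x0 + right + 1) 0 = pivot
      · rw [if_pos ⟨by push_cast at hb; omega, hm.1, hm.2⟩,
          if_neg (by push Not; exact ⟨by omega, by omega, hm.2⟩)]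
        rw [ih (right + 1) x0 bound (by omega) hx (by push_cast at hb ⊢; omega), hx1]
        ring
      · have hcond : x0 + right + 1 < 0 ∨ x0 + right + 1 > hi ∨
            PySem.List.pyGetD row (x0 + right + 1) 0 ≠ pivot := by
          push Not at hm
          by_cases h0 : x0 + right + 1 ≤ hi
          · exact Or.inr (Or.inr (hm h0))
          · exact Or.inr (Or.inl (by omega))
        rw [if_neg (by push Not at hm ⊢; intro _ h0; exact hm h0), if_pos hcond]
        omega

-- Abstract view of A's scan: the same fold, over the window's Boolean match pattern.
def pvScanStep (acc : Int × Bool) (b : Bool) : Int × Bool :=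
  if acc.2 then acc
  else
    let c : Int := if b then acc.1 + 1 else 0
    (c, decide (c ≥ pvMAX_LEN))

def pvScanA (bs : List Bool) : Bool := (bs.foldl pvScanStep (0, false)).2

-- Abstract view of B's walks: length of the initial all-true prefix of a pattern.
def pvRunLen : List Bool → Int
  | [] => 0
  | b :: bs => if b then 1 + pvRunLen bs else 0

lemma pvRunLen_replicate_false (k : Nat) : pvRunLen (List.replicate k false) = 0 := by
  cases k <;> simp [pvRunLen, List.replicate]

lemma pvRunLen_append_replicate (l : List Bool) (k : Nat) :
    pvRunLen (l ++ List.replicate k false) = pvRunLen l := by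
  induction l with
  | nil => simpa using pvRunLen_replicate_false k
  | cons b t ih => by_cases hb : b <;> simp [pvRunLen, hb, ih]

lemma pvScanA_false_prefix (k : Nat) (xs : List Bool) :
    pvScanA (List.replicate k false ++ xs) = pvScanA xs := by
  induction k with
  | zero => simp
  | succ k ih =>
      have h : List.replicate (k + 1) false ++ xs = false :: (List.replicate k false ++ xs) := by
        simp [List.replicate]
      rw [h]
      show (List.foldl pvScanStep (pvScanStep (0, false) false) _).2 = _
      have hstep : pvScanStep (0, false) false = (0, false) := by decide
      rw [hstep]; exact ih

lemma pvFoldl_scanStep_replicate_false (k : Nat) (acc : Int × Bool) :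
    (List.foldl pvScanStep acc (List.replicate k false)).2 = acc.2 := by
  induction k generalizing acc with
  | zero => rfl
  | succ k ih =>
      have h : List.replicate (k + 1) false = false :: List.replicate k false := by
        simp [List.replicate]
      rw [h, List.foldl_cons, ih]
      rcases acc with ⟨c, f⟩
      cases f <;> norm_num [pvScanStep, pvMAX_LEN]

lemma pvScanA_false_suffix (xs : List Bool) (k : Nat) :
    pvScanA (xs ++ List.replicate k false) = pvScanA xs := by
  unfold pvScanA
  rw [List.foldl_append, pvFoldl_scanStep_replicate_false]

lemma pvLen4 (l : List Bool) (h : l.length = 4) : ∃ a b c d, l = [a, b, c, d] := by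
  rcases l with _ | ⟨a, l⟩; · simp at h
  rcases l with _ | ⟨b, l⟩; · simp at h
  rcases l with _ | ⟨c, l⟩; · simp at h
  rcases l with _ | ⟨d, l⟩; · simp at h
  rcases l with _ | ⟨e, l⟩
  · exact ⟨a, b, c, d, rfl⟩
  · simp at h

-- the finite core, checked exhaustively on full-width 4+1+4 windows
lemma pvCore4 (a b c d p q r s : Bool) :
    pvScanA ([a, b, c, d].reverse ++ true :: [p, q, r, s]) =
      decide (pvRunLen [a, b, c, d] + pvRunLen [p, q, r, s] + 1 ≥ 5) := by revert a b c d p q r s; decide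

-- core: A's scan finds a 5-run in the window iff the through-pivot run has length ≥ 5
lemma pvCore (L R : List Bool) (hL : L.length ≤ 4) (hR : R.length ≤ 4) :
    pvScanA (L.reverse ++ true :: R) = decide (pvRunLen L + pvRunLen R + 1 ≥ 5) := by
  obtain ⟨a, b, c, d, hLpad⟩ := pvLen4 (L ++ List.replicate (4 - L.length) false) (by simp; omega)
  obtain ⟨p, q, r, s, hRpad⟩ := pvLen4 (R ++ List.replicate (4 - R.length) false) (by simp; omega)
  have hscan : pvScanA ([a, b, c, d].reverse ++ true :: [p, q, r, s]) =
      pvScanA (L.reverse ++ true :: R) := by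
    rw [← hLpad, ← hRpad, List.reverse_append, List.reverse_replicate]
    have h : List.replicate (4 - L.length) false ++ L.reverse ++
        (true :: (R ++ List.replicate (4 - R.length) false))
        = List.replicate (4 - L.length) false ++
          ((L.reverse ++ true :: R) ++ List.replicate (4 - R.length) false) := by
      simp
    rw [h, pvScanA_false_prefix, pvScanA_false_suffix]
  have hrL : pvRunLen [a, b, c, d] = pvRunLen L := by rw [← hLpad, pvRunLen_append_replicate]
  have hrR : pvRunLen [p, q, r, s] = pvRunLen R := by rw [← hRpad, pvRunLen_append_replicate]
  rw [← hscan, pvCore4, hrL, hrR]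

-- a window shorter than 5 cells can never produce a 5-run
lemma pvScanA_short (bs : List Bool) (h : bs.length ≤ 4) : pvScanA bs = false := by
  obtain ⟨a, b, c, d, hp⟩ := pvLen4 (bs ++ List.replicate (4 - bs.length) false) (by simp; omega)
  have hpad := pvScanA_false_suffix bs (4 - bs.length)
  rw [hp] at hpad
  rw [← hpad]
  clear hp hpad
  revert a b c d; decide

-- the left clamped walk = run length of the reversed left-window match pattern
lemma pvLeft_eq (row : List Int) (pivot hi : Int) :
    ∀ (b : Nat) (x : Int), 0 ≤ x → x ≤ hi →
      pvCountDir row pivot x (-1) 0 hi b =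
        pvRunLen (((PySem.List.pyRange (max (x - (b : Int)) 0) x 1).map
          (fun i => decide (PySem.List.pyGetD row i 0 = pivot))).reverse) := by
  intro b
  induction b with
  | zero =>
      intro x hx _
      rw [show max (x - ((0 : Nat) : Int)) 0 = x by omega, PySem.List.pyRange_one_eq_nil le_rfl]
      rfl
  | succ b ih =>
      intro x hx hhi
      by_cases h0 : x = 0
      · subst h0
        rw [show max ((0 : Int) - ((b + 1 : Nat) : Int)) 0 = 0 by push_cast; omega,
          PySem.List.pyRange_one_eq_nil le_rfl]
        simp only [pvCountDir, List.map_nil, List.reverse_nil]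
        rw [if_pos (by norm_num)]
        rfl
      · have hsplit : PySem.List.pyRange (max (x - ((b + 1 : Nat) : Int)) 0) x 1 =
            PySem.List.pyRange (max (x - 1 - (b : Int)) 0) (x - 1) 1 ++ [x - 1] := by
          have h2 := PySem.List.pyRange_one_succ_right
            (a := max (x - 1 - (b : Int)) 0) (b := x - 1) (by omega)
          rw [show x - 1 + 1 = x by ring] at h2
          rw [show max (x - ((b + 1 : Nat) : Int)) 0 = max (x - 1 - (b : Int)) 0 by
            push_cast; omega, h2]
        rw [hsplit]
        simp only [pvCountDir, List.map_append, List.reverse_append, List.map_cons, List.map_nil,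
          List.reverse_cons, List.reverse_nil, List.nil_append, List.cons_append]
        rw [show x + (-1) = x - 1 by ring]
        by_cases heq : PySem.List.pyGetD row (x - 1) 0 = pivot
        · rw [if_neg (by push Not; exact ⟨by omega, by omega, heq⟩)]
          rw [ih (x - 1) (by omega) (by omega)]
          simp [pvRunLen, heq]
        · rw [if_pos (Or.inr (Or.inr heq))]
          simp [pvRunLen, heq]

-- the right clamped walk = run length of the right-window match pattern
lemma pvRight_eq (row : List Int) (pivot hi : Int) :
    ∀ (b : Nat) (x : Int), 0 ≤ x →
      pvCountDir row pivot x 1 0 hi b =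
        pvRunLen ((PySem.List.pyRange (x + 1) (min (x + (b : Int)) hi + 1) 1).map
          (fun i => decide (PySem.List.pyGetD row i 0 = pivot))) := by
  intro b
  induction b with
  | zero =>
      intro x hx
      rw [PySem.List.pyRange_one_eq_nil (by omega)]
      rfl
  | succ b ih =>
      intro x hx
      by_cases hhi : x + 1 > hi
      · rw [PySem.List.pyRange_one_eq_nil (by omega)]
        simp only [pvCountDir]
        rw [if_pos (Or.inr (Or.inl hhi))]
        rfl
      · push Not at hhi
        have hcons : PySem.List.pyRange (x + 1) (min (x + ((b + 1 : Nat) : Int)) hi + 1) 1 =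
            (x + 1) :: PySem.List.pyRange ((x + 1) + 1) (min ((x + 1) + (b : Int)) hi + 1) 1 := by
          rw [show min (x + ((b + 1 : Nat) : Int)) hi = min ((x + 1) + (b : Int)) hi by
            push_cast; ring_nf]
          exact PySem.List.pyRange_one_cons (by omega)
        rw [hcons]
        simp only [pvCountDir, List.map_cons]
        by_cases heq : PySem.List.pyGetD row (x + 1) 0 = pivot
        · rw [if_neg (by push Not; exact ⟨by omega, by omega, heq⟩)]
          rw [ih (x + 1) (by omega)]
          simp [pvRunLen, heq]
        · rw [if_pos (Or.inr (Or.inr heq))]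
          simp [pvRunLen, heq]

-- A's port is the abstract scan over the window's match pattern
lemma pvA_eq_scan (state : List (List Int)) (lm : Int × Int) :
    check_row_end state lm =
      pvScanA ((PySem.List.pyRange (max (lm.1 - 4) 0)
          (min (lm.1 + 4) ((state.length : Int) - 1) + 1) 1).map
        (fun i => decide (PySem.List.pyGetD (PySem.List.pyGetD state lm.2 []) i 0 =
          PySem.List.pyGetD (PySem.List.pyGetD state lm.2 []) lm.1 0))) := by
  unfold check_row_end pvScanA
  rw [List.foldl_map]
  norm_num [pvMAX_LEN]
  congr 1
  congr 1
  funext acc x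
  by_cases hf : acc.2
  · simp [pvScanStep, hf]
  · by_cases heq : PySem.List.pyGetD (PySem.List.pyGetD state lm.2 []) x 0 =
        PySem.List.pyGetD (PySem.List.pyGetD state lm.2 []) lm.1 0
    · simp [pvScanStep, hf, heq, pvMAX_LEN]
    · simp [pvScanStep, hf, heq, pvMAX_LEN]

-- ===== VERDICT (by name: the statement is the Claim_ definition above) =====
theorem check_row_end_spec : Claim_equal_check_row_end := by
  intro state lm _hdom _hpre
  unfold Spec_check_row_end
  by_cases hon : 0 ≤ lm.1 ∧ lm.1 < (state.length : Int)
  case neg =>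
    -- off-board move: B's guard returns false; A's window has < 5 cells, so the scan fails
    have hB : check_row_end_alt state lm = false := by
      simp only [check_row_end_alt]; rw [if_neg hon]
    rw [hB, pvA_eq_scan state lm]
    apply pvScanA_short
    rw [List.length_map, PySem.List.length_pyRange_one]
    omega
  obtain ⟨hx0, hxn⟩ := hon
  rw [pvA_eq_scan state lm]
  simp only [check_row_end_alt]
  rw [if_pos (And.intro hx0 hxn)]
  rw [show (pvMAX_LEN - 1) = (4 : Int) from by decide]
  rw [show ((4 : Int)).toNat = 4 from by decide]
  -- names for the pieces
  have hL := pvWalkL_eq (PySem.List.pyGetD state lm.2 [])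
      (PySem.List.pyGetD (PySem.List.pyGetD state lm.2 []) lm.1 0)
      ((state.length : Int) - 1) 4 0 lm.1 le_rfl (by norm_num) (by omega)
  rw [show lm.1 - 0 = lm.1 by ring, show (0 : Int) + _ = _ from zero_add _] at hL
  rw [hL]
  have hLnn := pvCountDir_nonneg (PySem.List.pyGetD state lm.2 [])
      (PySem.List.pyGetD (PySem.List.pyGetD state lm.2 []) lm.1 0) (-1) 0
      ((state.length : Int) - 1) 4 lm.1
  have hLle := pvCountDir_le (PySem.List.pyGetD state lm.2 [])
      (PySem.List.pyGetD (PySem.List.pyGetD state lm.2 []) lm.1 0) (-1) 0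
      ((state.length : Int) - 1) 4 lm.1
  have hR := pvWalkR_eq (PySem.List.pyGetD state lm.2 [])
      (PySem.List.pyGetD (PySem.List.pyGetD state lm.2 []) lm.1 0)
      ((state.length : Int) - 1)
      ((4 - pvCountDir (PySem.List.pyGetD state lm.2 [])
        (PySem.List.pyGetD (PySem.List.pyGetD state lm.2 []) lm.1 0) lm.1 (-1) 0
        ((state.length : Int) - 1) 4).toNat) 0 lm.1
      (4 - pvCountDir (PySem.List.pyGetD state lm.2 [])
        (PySem.List.pyGetD (PySem.List.pyGetD state lm.2 []) lm.1 0) lm.1 (-1) 0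
        ((state.length : Int) - 1) 4) le_rfl hx0 (by push_cast at hLle ⊢; omega)
  rw [show lm.1 + 0 = lm.1 by ring, show (0 : Int) + _ = _ from zero_add _] at hR
  rw [hR]
  have htr := pvCountDir_trunc (PySem.List.pyGetD state lm.2 [])
      (PySem.List.pyGetD (PySem.List.pyGetD state lm.2 []) lm.1 0) 1 0
      ((state.length : Int) - 1)
      ((4 - pvCountDir (PySem.List.pyGetD state lm.2 [])
        (PySem.List.pyGetD (PySem.List.pyGetD state lm.2 []) lm.1 0) lm.1 (-1) 0
        ((state.length : Int) - 1) 4).toNat) 4 lm.1 (by omega)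
  rw [htr]
  have hRnn := pvCountDir_nonneg (PySem.List.pyGetD state lm.2 [])
      (PySem.List.pyGetD (PySem.List.pyGetD state lm.2 []) lm.1 0) 1 0
      ((state.length : Int) - 1) 4 lm.1
  rw [show (decide (pvCountDir (PySem.List.pyGetD state lm.2 [])
        (PySem.List.pyGetD (PySem.List.pyGetD state lm.2 []) lm.1 0) lm.1 (-1) 0
        ((state.length : Int) - 1) 4 +
      min (pvCountDir (PySem.List.pyGetD state lm.2 [])
        (PySem.List.pyGetD (PySem.List.pyGetD state lm.2 []) lm.1 0) lm.1 1 0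
        ((state.length : Int) - 1) 4)
        (((4 - pvCountDir (PySem.List.pyGetD state lm.2 [])
          (PySem.List.pyGetD (PySem.List.pyGetD state lm.2 []) lm.1 0) lm.1 (-1) 0
          ((state.length : Int) - 1) 4).toNat : Int)) + 1 ≥ pvMAX_LEN))
      = (decide (pvCountDir (PySem.List.pyGetD state lm.2 [])
        (PySem.List.pyGetD (PySem.List.pyGetD state lm.2 []) lm.1 0) lm.1 (-1) 0
        ((state.length : Int) - 1) 4 +
      pvCountDir (PySem.List.pyGetD state lm.2 [])
        (PySem.List.pyGetD (PySem.List.pyGetD state lm.2 []) lm.1 0) lm.1 1 0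
        ((state.length : Int) - 1) 4 + 1 ≥ pvMAX_LEN))
    from decide_eq_decide.mpr (by unfold pvMAX_LEN; omega)]
  rw [pvLeft_eq (PySem.List.pyGetD state lm.2 [])
      (PySem.List.pyGetD (PySem.List.pyGetD state lm.2 []) lm.1 0)
      ((state.length : Int) - 1) 4 lm.1 hx0 (by omega),
    pvRight_eq (PySem.List.pyGetD state lm.2 [])
      (PySem.List.pyGetD (PySem.List.pyGetD state lm.2 []) lm.1 0)
      ((state.length : Int) - 1) 4 lm.1 hx0]
  push_cast
  -- split A's window at the pivot
  rw [PySem.List.pyRange_one_append (max (lm.1 - 4) 0) lm.1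
      (min (lm.1 + 4) ((state.length : Int) - 1) + 1) (by omega) (by omega),
    PySem.List.pyRange_one_cons (a := lm.1) (b := min (lm.1 + 4) ((state.length : Int) - 1) + 1)
      (by omega)]
  simp only [List.map_append, List.map_cons, decide_true]
  have hcore := pvCore
    (((PySem.List.pyRange (max (lm.1 - 4) 0) lm.1 1).map
      (fun i => decide (PySem.List.pyGetD (PySem.List.pyGetD state lm.2 []) i 0 =
        PySem.List.pyGetD (PySem.List.pyGetD state lm.2 []) lm.1 0))).reverse)
    ((PySem.List.pyRange (lm.1 + 1) (min (lm.1 + 4) ((state.length : Int) - 1) + 1) 1).map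
      (fun i => decide (PySem.List.pyGetD (PySem.List.pyGetD state lm.2 []) i 0 =
        PySem.List.pyGetD (PySem.List.pyGetD state lm.2 []) lm.1 0)))
    (by rw [List.length_reverse, List.length_map, PySem.List.length_pyRange_one]; omega)
    (by rw [List.length_map, PySem.List.length_pyRange_one]; omega)
  rw [List.reverse_reverse] at hcore
  rw [hcore]
  norm_num [pvMAX_LEN]
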